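-- pv_equiv track=rewrite | github.com/shuhul/QuEra-Challenge | star/part1_surface_code/surface_code_d3.py | summarize_reference_stim_text
-- ===== SOURCE A (Python) =====
-- NOISE_PREFIXES: tuple[str, ...] = (
--     "DEPOLARIZE1", "DEPOLARIZE2", "X_ERROR", "Y_ERROR", "Z_ERROR",
--     "PAULI_CHANNEL_1", "PAULI_CHANNEL_2", "CORRELATED_ERROR", "ELSE_CORRELATED_ERROR",
-- )
--
-- def summarize_reference_stim_text(stim_text: str) -> dict[str, int]:
--     summary = {
--         "num_lines": 0, "num_ticks": 0, "num_detectors": 0,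
--         "num_measure_lines": 0, "num_noise_lines": 0,
--         "num_feed_forward_lines": 0, "num_rotation_lines": 0,
--     }
--     for raw_line in stim_text.splitlines():
--         stripped = raw_line.strip()
--         if not stripped:
--             continue
--         summary["num_lines"] += 1
--         if stripped.startswith("TICK"):          summary["num_ticks"] += 1
--         if stripped.startswith("DETECTOR"):     summary["num_detectors"] += 1
--         if stripped.startswith(("M ", "MX ")): summary["num_measure_lines"] += 1
--         if any(stripped.startswith(p) for p in NOISE_PREFIXES):
--             summary["num_noise_lines"] += 1
--         if "[FEED_FORWARD]" in stripped:        summary["num_feed_forward_lines"] += 1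
--         if stripped.startswith("R_Z("):         summary["num_rotation_lines"] += 1
--     return summary
-- ===== SOURCE B (Python) =====
-- NOISE_PREFIXES: tuple[str, ...] = (
--     "DEPOLARIZE1", "DEPOLARIZE2", "X_ERROR", "Y_ERROR", "Z_ERROR",
--     "PAULI_CHANNEL_1", "PAULI_CHANNEL_2", "CORRELATED_ERROR", "ELSE_CORRELATED_ERROR",
-- )
--
-- def summarize_reference_stim_text(stim_text: str) -> dict[str, int]:
--     lines = [s for s in (raw.strip() for raw in stim_text.splitlines()) if s]
--     return {
--         "num_lines": len(lines),
--         "num_ticks": sum(1 for s in lines if s.startswith("TICK")),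
--         "num_detectors": sum(1 for s in lines if s.startswith("DETECTOR")),
--         "num_measure_lines": sum(1 for s in lines if s.startswith(("M ", "MX "))),
--         "num_noise_lines": sum(1 for s in lines if any(s.startswith(p) for p in NOISE_PREFIXES)),
--         "num_feed_forward_lines": sum(1 for s in lines if "[FEED_FORWARD]" in s),
--         "num_rotation_lines": sum(1 for s in lines if s.startswith("R_Z(")),
--     }
-- ===== Notes on version B (the rewrite author's own statement) =====
-- stated objective: alternative
-- what changed: Replaces the single interleaved dict-mutating pass with one materialized filtered list of stripped lines and seven independent aggregations (len plus six generator-sum counts), one per summary field.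
import Mathlib
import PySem

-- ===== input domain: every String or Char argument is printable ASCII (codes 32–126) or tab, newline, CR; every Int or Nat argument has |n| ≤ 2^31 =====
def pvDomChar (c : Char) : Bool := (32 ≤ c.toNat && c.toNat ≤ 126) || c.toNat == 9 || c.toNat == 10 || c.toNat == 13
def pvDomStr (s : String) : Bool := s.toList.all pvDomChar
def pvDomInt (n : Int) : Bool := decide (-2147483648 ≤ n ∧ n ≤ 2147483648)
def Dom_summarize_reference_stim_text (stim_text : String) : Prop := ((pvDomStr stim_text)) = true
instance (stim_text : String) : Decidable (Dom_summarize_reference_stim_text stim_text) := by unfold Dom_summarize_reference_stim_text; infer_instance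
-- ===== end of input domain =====

-- B replaces A's single interleaved dict-mutating pass by one filtered list of stripped
-- lines and seven independent per-field aggregations (alternative decomposition, same cost).

-- ===== PORT A =====
def pvNoisePrefixes : List String :=
  ["DEPOLARIZE1", "DEPOLARIZE2", "X_ERROR", "Y_ERROR", "Z_ERROR",
   "PAULI_CHANNEL_1", "PAULI_CHANNEL_2", "CORRELATED_ERROR", "ELSE_CORRELATED_ERROR"]

-- summary[k] += 1
def pvBump (d : PySem.Dict String Int) (k : String) : PySem.Dict String Int :=
  d.modify k 0 (· + 1)

-- the body of A's loop over raw lines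
def pvStepA (d : PySem.Dict String Int) (raw_line : String) : PySem.Dict String Int :=
  let stripped := PySem.Str.strip raw_line
  if stripped == "" then d
  else
    let d := pvBump d "num_lines"
    let d := if PySem.Str.startswith stripped "TICK" then pvBump d "num_ticks" else d
    let d := if PySem.Str.startswith stripped "DETECTOR" then pvBump d "num_detectors" else d
    let d := if PySem.Str.startswith stripped "M " || PySem.Str.startswith stripped "MX "
             then pvBump d "num_measure_lines" else d
    let d := if pvNoisePrefixes.any (fun p => PySem.Str.startswith stripped p)
             then pvBump d "num_noise_lines" else d
    let d := if PySem.Str.isIn "[FEED_FORWARD]" stripped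
             then pvBump d "num_feed_forward_lines" else d
    let d := if PySem.Str.startswith stripped "R_Z(" then pvBump d "num_rotation_lines" else d
    d

def summarize_reference_stim_text (stim_text : String) : List (String × Int) :=
  ((PySem.Str.splitlines stim_text).foldl pvStepA
    (PySem.Dict.mk
      [("num_lines", 0), ("num_ticks", 0), ("num_detectors", 0),
       ("num_measure_lines", 0), ("num_noise_lines", 0),
       ("num_feed_forward_lines", 0), ("num_rotation_lines", 0)])).items

-- ===== PORT B =====
def summarize_reference_stim_text_alt (stim_text : String) : List (String × Int) :=
  let lines := ((PySem.Str.splitlines stim_text).map PySem.Str.strip).filter (fun s => !(s == ""))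
  [("num_lines", (lines.length : Int)),
   ("num_ticks", (lines.countP (fun s => PySem.Str.startswith s "TICK") : Int)),
   ("num_detectors", (lines.countP (fun s => PySem.Str.startswith s "DETECTOR") : Int)),
   ("num_measure_lines", (lines.countP (fun s => PySem.Str.startswith s "M " || PySem.Str.startswith s "MX ") : Int)),
   ("num_noise_lines", (lines.countP (fun s => pvNoisePrefixes.any (fun p => PySem.Str.startswith s p)) : Int)),
   ("num_feed_forward_lines", (lines.countP (fun s => PySem.Str.isIn "[FEED_FORWARD]" s) : Int)),
   ("num_rotation_lines", (lines.countP (fun s => PySem.Str.startswith s "R_Z(") : Int))]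

-- ===== PRECONDITION & SPEC =====
def Spec_summarize_reference_stim_text (stim_text : String) (out : List (String × Int)) : Prop := out = summarize_reference_stim_text_alt stim_text
instance (stim_text : String) (out : List (String × Int)) : Decidable (Spec_summarize_reference_stim_text stim_text out) := by unfold Spec_summarize_reference_stim_text; infer_instance

-- ===== CLAIM (what is proved, stated in full; the proofs are below) =====
def Claim_equal_summarize_reference_stim_text : Prop := ∀ (stim_text : String), Dom_summarize_reference_stim_text stim_text → Spec_summarize_reference_stim_text stim_text (summarize_reference_stim_text stim_text)

-- ===== LEMMAS AND PROOFS =====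
def pvMk7 (a b c d e f g : Int) : PySem.Dict String Int :=
  PySem.Dict.mk
    [("num_lines", a), ("num_ticks", b), ("num_detectors", c),
     ("num_measure_lines", d), ("num_noise_lines", e),
     ("num_feed_forward_lines", f), ("num_rotation_lines", g)]

theorem pvBump1 (a b c d e f g : Int) : pvBump (pvMk7 a b c d e f g) "num_lines" = pvMk7 (a+1) b c d e f g := by rfl
theorem pvBump2 (a b c d e f g : Int) : pvBump (pvMk7 a b c d e f g) "num_ticks" = pvMk7 a (b+1) c d e f g := by rfl
theorem pvBump3 (a b c d e f g : Int) : pvBump (pvMk7 a b c d e f g) "num_detectors" = pvMk7 a b (c+1) d e f g := by rfl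
theorem pvBump4 (a b c d e f g : Int) : pvBump (pvMk7 a b c d e f g) "num_measure_lines" = pvMk7 a b c (d+1) e f g := by rfl
theorem pvBump5 (a b c d e f g : Int) : pvBump (pvMk7 a b c d e f g) "num_noise_lines" = pvMk7 a b c d (e+1) f g := by rfl
theorem pvBump6 (a b c d e f g : Int) : pvBump (pvMk7 a b c d e f g) "num_feed_forward_lines" = pvMk7 a b c d e (f+1) g := by rfl
theorem pvBump7 (a b c d e f g : Int) : pvBump (pvMk7 a b c d e f g) "num_rotation_lines" = pvMk7 a b c d e f (g+1) := by rfl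

theorem pvStepA_mk7 (a b c d e f g : Int) (s : String) :
    pvStepA (pvMk7 a b c d e f g) s =
      if PySem.Str.strip s == "" then pvMk7 a b c d e f g
      else
        pvMk7 (a+1)
          (b + (if PySem.Str.startswith (PySem.Str.strip s) "TICK" then 1 else 0))
          (c + (if PySem.Str.startswith (PySem.Str.strip s) "DETECTOR" then 1 else 0))
          (d + (if PySem.Str.startswith (PySem.Str.strip s) "M " || PySem.Str.startswith (PySem.Str.strip s) "MX " then 1 else 0))
          (e + (if pvNoisePrefixes.any (fun p => PySem.Str.startswith (PySem.Str.strip s) p) then 1 else 0))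
          (f + (if PySem.Str.isIn "[FEED_FORWARD]" (PySem.Str.strip s) then 1 else 0))
          (g + (if PySem.Str.startswith (PySem.Str.strip s) "R_Z(" then 1 else 0)) := by
  unfold pvStepA
  by_cases h0 : (PySem.Str.strip s == "") = true
  · simp only [if_pos h0]
  · simp only [if_neg h0]
    split_ifs <;>
      simp [pvBump1, pvBump2, pvBump3, pvBump4, pvBump5, pvBump6, pvBump7]

theorem pvFoldA_mk7 (l : List String) (a b c d e f g : Int) :
    l.foldl pvStepA (pvMk7 a b c d e f g) =
      pvMk7
        (a + (((l.map PySem.Str.strip).filter (fun s => !(s == ""))).length : Int))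
        (b + ((((l.map PySem.Str.strip).filter (fun s => !(s == ""))).countP (fun s => PySem.Str.startswith s "TICK") : Nat) : Int))
        (c + ((((l.map PySem.Str.strip).filter (fun s => !(s == ""))).countP (fun s => PySem.Str.startswith s "DETECTOR") : Nat) : Int))
        (d + ((((l.map PySem.Str.strip).filter (fun s => !(s == ""))).countP (fun s => PySem.Str.startswith s "M " || PySem.Str.startswith s "MX ") : Nat) : Int))
        (e + ((((l.map PySem.Str.strip).filter (fun s => !(s == ""))).countP (fun s => pvNoisePrefixes.any (fun p => PySem.Str.startswith s p)) : Nat) : Int))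
        (f + ((((l.map PySem.Str.strip).filter (fun s => !(s == ""))).countP (fun s => PySem.Str.isIn "[FEED_FORWARD]" s) : Nat) : Int))
        (g + ((((l.map PySem.Str.strip).filter (fun s => !(s == ""))).countP (fun s => PySem.Str.startswith s "R_Z(") : Nat) : Int)) := by
  induction l generalizing a b c d e f g with
  | nil => simp
  | cons s t ih =>
    simp only [List.foldl_cons, pvStepA_mk7, List.map_cons, List.filter_cons]
    by_cases h : (PySem.Str.strip s == "") = true
    · simp [h, ih]
    · simp only [Bool.not_eq_true] at h
      simp [h, List.countP_cons, ih]
      unfold pvMk7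
      simp only [PySem.Dict.mk.injEq, List.cons.injEq, Prod.mk.injEq, and_true, true_and]
      refine ⟨by ring, ?_, ?_, ?_, ?_, ?_, ?_⟩ <;>
        · split_ifs <;> ring

-- ===== VERDICT (by name: the statement is the Claim_ definition above) =====
theorem summarize_reference_stim_text_spec : Claim_equal_summarize_reference_stim_text := by
  intro s _
  show _ = _
  unfold summarize_reference_stim_text summarize_reference_stim_text_alt
  rw [show (PySem.Dict.mk
      [("num_lines", (0:Int)), ("num_ticks", 0), ("num_detectors", 0),
       ("num_measure_lines", 0), ("num_noise_lines", 0),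
       ("num_feed_forward_lines", 0), ("num_rotation_lines", 0)]) = pvMk7 0 0 0 0 0 0 0 from rfl,
    pvFoldA_mk7]
  simp [pvMk7]
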